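-- pv_equiv track=rewrite | github.com/NikitaKums/TalTech | iti0102/EX09B/princesses_vol2.py | sort_by_status
-- ===== SOURCE A (Python) =====
-- def sort_by_status(filtered_lines) -> list:
--     """
--     Sort lines by pattern FIGHTS FOR LIFE > INJURED > IN PANIC > BORED.
--
--     FIGHTS FOR LIFE comes before INJURED etc.
--
--     :param filtered_lines:
--     :return: sorted lines.
--     """
--     patterns = ["FIGHTS FOR LIFE", "INJURED", "IN PANIC", "BORED"]
--     fightforlife = []
--     injured = []
--     inpanic = []
--     bored = []
--     for word in filtered_lines:
--         if patterns[0] in word: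
--             fightforlife.append(word)
--             continue
--         if patterns[1] in word:
--             injured.append(word)
--             continue
--         if patterns[2] in word:
--             inpanic.append(word)
--             continue
--         if patterns[3] in word:
--             bored.append(word)
--             continue
--     result = fightforlife + injured + inpanic + bored
--     return result
-- ===== SOURCE B (Python) =====
-- def sort_by_status(filtered_lines) -> list:
--     """Pattern-major rebuild: one filtering pass per status bucket, keyed by the
--     first matching pattern; lines matching no pattern are dropped."""
--     patterns = ["FIGHTS FOR LIFE", "INJURED", "IN PANIC", "BORED"]
--
--     def prio(word):
--         return next((i for i, p in enumerate(patterns) if p in word), None)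
--
--     return [word for i in range(len(patterns)) for word in filtered_lines if prio(word) == i]
-- ===== Notes on version B (the rewrite author's own statement) =====
-- stated objective: idiomatic
-- what changed: Replaced the four explicit accumulator lists built in one line-major pass by a first-match priority function and a pattern-major comprehension (one filtering pass per bucket); unmatched lines are still dropped.
import Mathlib
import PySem

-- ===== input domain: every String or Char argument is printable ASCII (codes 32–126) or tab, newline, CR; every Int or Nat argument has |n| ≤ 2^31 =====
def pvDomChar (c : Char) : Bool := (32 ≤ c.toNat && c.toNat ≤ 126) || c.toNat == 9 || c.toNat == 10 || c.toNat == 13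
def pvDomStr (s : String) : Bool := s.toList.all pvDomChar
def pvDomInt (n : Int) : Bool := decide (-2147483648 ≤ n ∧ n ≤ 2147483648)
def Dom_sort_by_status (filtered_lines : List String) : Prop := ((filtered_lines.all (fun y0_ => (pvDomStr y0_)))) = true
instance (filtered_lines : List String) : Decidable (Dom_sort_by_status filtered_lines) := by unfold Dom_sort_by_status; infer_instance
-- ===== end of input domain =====

-- B: pattern-major rebuild (first-match priority function + one filtering pass per bucket) of A's four-accumulator single pass; same return value.


-- ===== PORT A =====
-- loop body of A, one helper so the proof's induction hypothesis matches syntactically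
def pvStepA (patterns : List String) (st : List String × List String × List String × List String)
    (word : String) : List String × List String × List String × List String :=
  match st with
  | (fightforlife, injured, inpanic, bored) =>
    if PySem.Str.isIn (patterns.getD 0 "") word then (fightforlife ++ [word], injured, inpanic, bored)
    else if PySem.Str.isIn (patterns.getD 1 "") word then (fightforlife, injured ++ [word], inpanic, bored)
    else if PySem.Str.isIn (patterns.getD 2 "") word then (fightforlife, injured, inpanic ++ [word], bored)
    else if PySem.Str.isIn (patterns.getD 3 "") word then (fightforlife, injured, inpanic, bored ++ [word])
    else (fightforlife, injured, inpanic, bored)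

def sort_by_status (filtered_lines : List String) : List String :=
  let patterns : List String := ["FIGHTS FOR LIFE", "INJURED", "IN PANIC", "BORED"]
  let st := filtered_lines.foldl (pvStepA patterns) ([], [], [], [])
  st.1 ++ st.2.1 ++ st.2.2.1 ++ st.2.2.2

-- ===== PORT B =====
-- first-match priority: index of the first pattern contained in the word (none if no match)
def pvPrio (patterns : List String) (word : String) : Option Nat :=
  patterns.findIdx? (fun p => PySem.Str.isIn p word)

def sort_by_status_alt (filtered_lines : List String) : List String :=
  let patterns : List String := ["FIGHTS FOR LIFE", "INJURED", "IN PANIC", "BORED"]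
  (List.range patterns.length).flatMap
    (fun i => filtered_lines.filter (fun word => pvPrio patterns word == some i))

-- ===== PRECONDITION & SPEC =====
def Spec_sort_by_status (filtered_lines : List String) (out : List String) : Prop := out = sort_by_status_alt filtered_lines
instance (filtered_lines : List String) (out : List String) : Decidable (Spec_sort_by_status filtered_lines out) := by unfold Spec_sort_by_status; infer_instance

-- ===== CLAIM (what is proved, stated in full; the proofs are below) =====
def Claim_equal_sort_by_status : Prop := ∀ (filtered_lines : List String), Dom_sort_by_status filtered_lines → Spec_sort_by_status filtered_lines (sort_by_status filtered_lines)

-- ===== LEMMAS AND PROOFS =====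

def pvPats : List String := ["FIGHTS FOR LIFE", "INJURED", "IN PANIC", "BORED"]

-- the branch conditions A's loop actually tests, as predicates
def pvC0 (w : String) : Bool := PySem.Str.isIn "FIGHTS FOR LIFE" w
def pvC1 (w : String) : Bool := !pvC0 w && PySem.Str.isIn "INJURED" w
def pvC2 (w : String) : Bool := !pvC0 w && !PySem.Str.isIn "INJURED" w && PySem.Str.isIn "IN PANIC" w
def pvC3 (w : String) : Bool := !pvC0 w && !PySem.Str.isIn "INJURED" w && !PySem.Str.isIn "IN PANIC" w && PySem.Str.isIn "BORED" w

lemma pvStepA_eq0 (f i p b : List String) (w : String) (h0 : pvC0 w) :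
    pvStepA pvPats (f, i, p, b) w = (f ++ [w], i, p, b) := by
  simp only [pvC0] at h0
  simp at h0
  simp [pvStepA, pvPats, h0]

lemma pvStepA_eq1 (f i p b : List String) (w : String) (h1 : pvC1 w) :
    pvStepA pvPats (f, i, p, b) w = (f, i ++ [w], p, b) := by
  simp only [pvC1, pvC0, Bool.and_eq_true, Bool.not_eq_true'] at h1
  obtain ⟨a0, a1⟩ := h1
  simp at a0 a1
  simp [pvStepA, pvPats, a0, a1]

lemma pvStepA_eq2 (f i p b : List String) (w : String) (h2 : pvC2 w) :
    pvStepA pvPats (f, i, p, b) w = (f, i, p ++ [w], b) := by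
  simp only [pvC2, pvC0, Bool.and_eq_true, Bool.not_eq_true'] at h2
  obtain ⟨⟨a0, a1⟩, a2⟩ := h2
  simp at a0 a1 a2
  simp [pvStepA, pvPats, a0, a1, a2]

lemma pvStepA_eq3 (f i p b : List String) (w : String) (h3 : pvC3 w) :
    pvStepA pvPats (f, i, p, b) w = (f, i, p, b ++ [w]) := by
  simp only [pvC3, pvC0, Bool.and_eq_true, Bool.not_eq_true'] at h3
  obtain ⟨⟨⟨a0, a1⟩, a2⟩, a3⟩ := h3
  simp at a0 a1 a2 a3
  simp [pvStepA, pvPats, a0, a1, a2, a3]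

lemma pvStepA_eq4 (f i p b : List String) (w : String)
    (h0 : ¬ pvC0 w) (h1 : ¬ pvC1 w) (h2 : ¬ pvC2 w) (h3 : ¬ pvC3 w) :
    pvStepA pvPats (f, i, p, b) w = (f, i, p, b) := by
  simp only [pvC0, pvC1, pvC2, pvC3, Bool.and_eq_true, Bool.not_eq_true',
    Bool.not_eq_true, not_and] at h0 h1 h2 h3
  have a1 := h1 h0
  have a2 := h2 ⟨h0, a1⟩
  have a3 := h3 ⟨⟨h0, a1⟩, a2⟩
  simp at h0 a1 a2 a3
  simp [pvStepA, pvPats, h0, a1, a2, a3]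

lemma pvLoopA_eq (l : List String) (f i p b : List String) :
    l.foldl (pvStepA pvPats) (f, i, p, b)
    = (f ++ l.filter pvC0, i ++ l.filter pvC1, p ++ l.filter pvC2, b ++ l.filter pvC3) := by
  induction l generalizing f i p b with
  | nil => simp
  | cons w t ih =>
      rw [List.foldl_cons]
      by_cases h0 : pvC0 w
      · have hn1 : ¬ pvC1 w := by simp [pvC1, h0]
        have hn2 : ¬ pvC2 w := by simp [pvC2, h0]
        have hn3 : ¬ pvC3 w := by simp [pvC3, h0]
        rw [pvStepA_eq0 f i p b w h0, ih]
        simp [List.filter_cons, h0, hn1, hn2, hn3]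
      · by_cases h1 : pvC1 w
        · have hI : PySem.Str.isIn "INJURED" w = true := by
            have h1' := h1; simp only [pvC1, Bool.and_eq_true] at h1'; exact h1'.2
          have hI' := hI
          simp at hI'
          have hn2 : ¬ pvC2 w := by simp [pvC2, h0, hI']
          have hn3 : ¬ pvC3 w := by simp [pvC3, h0, hI']
          rw [pvStepA_eq1 f i p b w h1, ih]
          simp [List.filter_cons, h0, h1, hn2, hn3]
        · by_cases h2 : pvC2 w
          · have hP : PySem.Str.isIn "IN PANIC" w = true := by
              have h2' := h2; simp only [pvC2, Bool.and_eq_true] at h2'; exact h2'.2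
            have hP' := hP
            simp at hP'
            have hn3 : ¬ pvC3 w := by simp [pvC3, h0, hP']
            rw [pvStepA_eq2 f i p b w h2, ih]
            simp [List.filter_cons, h0, h1, h2, hn3]
          · by_cases h3 : pvC3 w
            · rw [pvStepA_eq3 f i p b w h3, ih]
              simp [List.filter_cons, h0, h1, h2, h3]
            · rw [pvStepA_eq4 f i p b w h0 h1 h2 h3, ih]
              simp [List.filter_cons, h0, h1, h2, h3]

-- B's per-bucket predicates coincide with A's branch conditions
lemma pvPrio_eq (w : String) (k : Nat) :
    (pvPrio pvPats w == some k) =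
      (if k = 0 then pvC0 w else if k = 1 then pvC1 w else if k = 2 then pvC2 w
       else if k = 3 then pvC3 w else false) := by
  rcases k with _ | _ | _ | _ | k <;>
  by_cases h0 : PySem.Str.isIn "FIGHTS FOR LIFE" w <;>
  by_cases h1 : PySem.Str.isIn "INJURED" w <;>
  by_cases h2 : PySem.Str.isIn "IN PANIC" w <;>
  by_cases h3 : PySem.Str.isIn "BORED" w <;>
    simp at h0 h1 h2 h3 <;>
    simp [pvPrio, pvPats, pvC0, pvC1, pvC2, pvC3, List.findIdx?_cons, h0, h1, h2, h3]

lemma pvFilter_prio (l : List String) (k : Nat) :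
    l.filter (fun w => pvPrio pvPats w == some k) =
      (if k = 0 then l.filter pvC0 else if k = 1 then l.filter pvC1 else if k = 2 then l.filter pvC2
       else if k = 3 then l.filter pvC3 else []) := by
  have : l.filter (fun w => pvPrio pvPats w == some k) =
      l.filter (fun w => if k = 0 then pvC0 w else if k = 1 then pvC1 w else if k = 2 then pvC2 w
        else if k = 3 then pvC3 w else false) := by
    apply List.filter_congr
    intro w _
    exact pvPrio_eq w k
  rw [this]
  split_ifs <;> simp

-- ===== VERDICT (by name: the statement is the Claim_ definition above) =====
theorem sort_by_status_spec : Claim_equal_sort_by_status := by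
  intro l _
  show sort_by_status l = sort_by_status_alt l
  unfold sort_by_status sort_by_status_alt
  have hA := pvLoopA_eq l [] [] [] []
  have h0 := pvFilter_prio l 0
  have h1 := pvFilter_prio l 1
  have h2 := pvFilter_prio l 2
  have h3 := pvFilter_prio l 3
  simp only [pvPats] at hA h0 h1 h2 h3
  norm_num at h0 h1 h2 h3
  simp only [hA]
  simp [List.range_succ, h0, h1, h2, h3]
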